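-- pv_equiv track=rewrite | github.com/komachi/josm-ge-preset | toNSI.py | generate_tag_type_map
-- ===== SOURCE A (Python) =====
-- def generate_tag_type_map(nsi_tree):
--     m = {}
--     for type in nsi_tree:
--         for key in nsi_tree[type]:
--             for value in nsi_tree[type][key]:
--                 if not (key, value) in m:
--                     m[(key, value)] = type
--                 else:
--                     m[(key, value)] = "both"
--     return m
-- ===== SOURCE B (Python) =====
-- def generate_tag_type_map(nsi_tree):
--     count = {}
--     rep = {}
--     for type in nsi_tree:
--         for key in nsi_tree[type]:
--             for value in nsi_tree[type][key]:
--                 pair = (key, value)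
--                 count[pair] = count.get(pair, 0) + 1
--                 if pair not in rep:
--                     rep[pair] = type
--     return {pair: rep[pair] if n == 1 else "both" for pair, n in count.items()}
-- ===== Notes on version B (the rewrite author's own statement) =====
-- stated objective: alternative
-- what changed: Replaces the in-loop membership check with 'both'-overwrite by a tally-then-resolve scheme: one pass builds a per-(key,value) occurrence count and a first-encountered-type table, a second pass emits the stored type when the count is 1 and 'both' otherwise.
import Mathlib
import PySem

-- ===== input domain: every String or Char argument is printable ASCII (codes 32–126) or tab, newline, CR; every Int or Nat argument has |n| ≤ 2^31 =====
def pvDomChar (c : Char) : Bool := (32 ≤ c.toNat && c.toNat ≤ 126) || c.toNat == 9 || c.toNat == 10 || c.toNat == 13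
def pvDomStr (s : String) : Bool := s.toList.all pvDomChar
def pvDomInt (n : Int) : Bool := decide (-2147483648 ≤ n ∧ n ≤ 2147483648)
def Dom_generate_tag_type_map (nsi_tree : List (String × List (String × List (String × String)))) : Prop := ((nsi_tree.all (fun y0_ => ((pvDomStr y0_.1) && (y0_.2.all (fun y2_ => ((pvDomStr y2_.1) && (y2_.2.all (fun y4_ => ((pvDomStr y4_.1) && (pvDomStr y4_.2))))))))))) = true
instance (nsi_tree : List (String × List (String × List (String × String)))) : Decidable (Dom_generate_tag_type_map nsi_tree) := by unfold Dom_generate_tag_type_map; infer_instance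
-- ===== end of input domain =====

-- B replaces A's in-loop membership check / 'both' overwrite by a tally-then-resolve
-- two-pass scheme (occurrence counter + first-type table, then one resolution pass);
-- same cost, different structure (objective: alternative).

-- ===== PORT A =====
-- the Python dict keyed by the tuple (key, value); the returned dict's items are
-- flattened ((k,v),t) ↦ (k,v,t) to fit the required output type
def generate_tag_type_map (nsi_tree : List (String × List (String × List (String × String)))) : List (String × String × String) :=
  let m : PySem.Dict (String × String) String :=
    nsi_tree.foldl (fun m ts =>
      ts.2.foldl (fun m ks =>
        ks.2.foldl (fun m vp =>
          if (m.contains (ks.1, vp.1)) = false then m.insert (ks.1, vp.1) ts.1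
          else m.insert (ks.1, vp.1) "both") m) m) PySem.Dict.empty
  m.items.map (fun p => (p.1.1, p.1.2, p.2))

-- ===== PORT B =====
-- state is the pair (count, rep); rep[pair] in the final comprehension is ported as
-- getD with a dummy default (the key is always present when looked up)
def generate_tag_type_map_alt (nsi_tree : List (String × List (String × List (String × String)))) : List (String × String × String) :=
  let cr : PySem.Dict (String × String) Int × PySem.Dict (String × String) String :=
    nsi_tree.foldl (fun cr ts =>
      ts.2.foldl (fun cr ks =>
        ks.2.foldl (fun cr vp =>
          (cr.1.insert (ks.1, vp.1) (cr.1.getD (ks.1, vp.1) 0 + 1),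
           if (cr.2.contains (ks.1, vp.1)) = false then cr.2.insert (ks.1, vp.1) ts.1
           else cr.2)) cr) cr) (PySem.Dict.empty, PySem.Dict.empty)
  cr.1.items.map (fun pn => (pn.1.1, pn.1.2, if pn.2 = 1 then cr.2.getD pn.1 "" else "both"))

-- ===== PRECONDITION & SPEC =====
def Spec_generate_tag_type_map (nsi_tree : List (String × List (String × List (String × String)))) (out : List (String × String × String)) : Prop := out = generate_tag_type_map_alt nsi_tree
instance (nsi_tree : List (String × List (String × List (String × String)))) (out : List (String × String × String)) : Decidable (Spec_generate_tag_type_map nsi_tree out) := by unfold Spec_generate_tag_type_map; infer_instance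

-- ===== CLAIM (what is proved, stated in full; the proofs are below) =====
def Claim_equal_generate_tag_type_map : Prop := ∀ (nsi_tree : List (String × List (String × List (String × String)))), Dom_generate_tag_type_map nsi_tree → Spec_generate_tag_type_map nsi_tree (generate_tag_type_map nsi_tree)

-- ===== LEMMAS AND PROOFS =====

-- the invariant tying A's dict to B's (count, rep) pair
def pvInv (d : PySem.Dict (String × String) String)
    (c : PySem.Dict (String × String) Int)
    (r : PySem.Dict (String × String) String) : Prop :=
  d.items = c.items.map (fun pn => (pn.1, if pn.2 = 1 then r.getD pn.1 "" else "both"))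
  ∧ c.keys.Nodup
  ∧ (∀ pn ∈ c.items, 1 ≤ pn.2)
  ∧ (∀ q, r.contains q = c.contains q)

lemma pvInv_empty : pvInv PySem.Dict.empty PySem.Dict.empty PySem.Dict.empty := by
  refine ⟨rfl, ?_, ?_, ?_⟩ <;> simp [PySem.Dict.empty, PySem.Dict.keys]

lemma pvKeys_eq {d : PySem.Dict (String × String) String}
    {c : PySem.Dict (String × String) Int}
    {r : PySem.Dict (String × String) String} (h : pvInv d c r) :
    d.keys = c.keys := by
  have h1 := h.1
  simp only [PySem.Dict.keys, h1, List.map_map]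
  rfl

lemma pvContains_eq {d : PySem.Dict (String × String) String}
    {c : PySem.Dict (String × String) Int}
    {r : PySem.Dict (String × String) String} (h : pvInv d c r) (p : String × String) :
    d.contains p = c.contains p := by
  rw [PySem.Dict.contains_eq_decide_mem_keys, PySem.Dict.contains_eq_decide_mem_keys,
    pvKeys_eq h]

lemma pvStep (t : String) (p : String × String)
    (d : PySem.Dict (String × String) String)
    (c : PySem.Dict (String × String) Int)
    (r : PySem.Dict (String × String) String) (h : pvInv d c r) :
    pvInv (if (d.contains p) = false then d.insert p t else d.insert p "both")
          (c.insert p (c.getD p 0 + 1))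
          (if (r.contains p) = false then r.insert p t else r) := by
  obtain ⟨h1, h2, h3, h4⟩ := h
  have hd := pvContains_eq ⟨h1, h2, h3, h4⟩ p
  by_cases hc : c.contains p = true
  · -- repeated pair: A overwrites with "both", B bumps the count, rep unchanged
    have hn : 1 ≤ c.getD p 0 := by
      have hs : (c.get? p).isSome := by
        rw [← PySem.Dict.contains_eq_isSome_get? c p]; exact hc
      obtain ⟨v, hv⟩ := Option.isSome_iff_exists.mp hs
      have hm := PySem.Dict.mem_items_of_get?_eq_some c hv
      have := h3 _ hm
      rwa [PySem.Dict.getD_of_get?_eq_some c 0 hv]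
    have hdp : d.contains p = true := by rw [hd]; exact hc
    have hrp : r.contains p = true := by rw [h4]; exact hc
    rw [hdp, hrp]
    simp only [Bool.true_eq_false, if_false]
    refine ⟨?_, ?_, ?_, ?_⟩
    · rw [PySem.Dict.items_insert_of_contains _ _ hdp,
        PySem.Dict.items_insert_of_contains _ _ hc, h1, List.map_map, List.map_map]
      refine List.map_congr_left (fun pn hpn => ?_)
      by_cases hp : pn.1 = p
      · simp only [Function.comp, hp]
        simp only [beq_self_eq_true, if_true]
        have : ¬ (c.getD p 0 + 1 = 1) := by omega
        simp [this]
      · simp only [Function.comp]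
        have hb : (pn.1 == p) = false := by simp [hp]
        simp [hb]
    · exact PySem.Dict.nodup_keys_insert _ _ _ h2
    · intro pn hpn
      rcases (PySem.Dict.mem_items_insert c _ _ _).mp hpn with heq | ⟨hmem, _⟩
      · subst heq; dsimp only; omega
      · exact h3 _ hmem
    · intro q
      rw [h4, PySem.Dict.contains_insert]
      by_cases hq : q = p
      · subst hq; simp [hc]
      · simp [hq]
  · -- fresh pair: both append; rep records the type
    have hc' : c.contains p = false := by simpa using hc
    have hdp : d.contains p = false := by rw [hd]; exact hc'
    have hrp : r.contains p = false := by rw [h4]; exact hc'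
    rw [hdp, hrp]
    simp only [if_true]
    have hpk : p ∉ c.keys := by
      rw [PySem.Dict.contains_eq_decide_mem_keys] at hc'
      simpa using hc'
    have hg0 : c.getD p 0 = 0 := PySem.Dict.getD_of_not_contains c 0 hc'
    refine ⟨?_, ?_, ?_, ?_⟩
    · rw [PySem.Dict.items_insert_of_not_contains _ _ hdp,
        PySem.Dict.items_insert_of_not_contains _ _ hc', h1, List.map_append]
      have hmap : ∀ pn ∈ c.items,
          (pn.1, if pn.2 = 1 then (r.insert p t).getD pn.1 "" else "both")
          = (pn.1, if pn.2 = 1 then r.getD pn.1 "" else "both") := by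
        intro pn hpn
        have hne : pn.1 ≠ p := fun he => hpk (he ▸ PySem.Dict.mem_keys_of_mem_items c hpn)
        rw [PySem.Dict.getD_insert_of_ne _ _ _ hne]
      rw [List.map_congr_left hmap]
      simp [hg0, PySem.Dict.getD_insert_self]
    · exact PySem.Dict.nodup_keys_insert _ _ _ h2
    · intro pn hpn
      rcases (PySem.Dict.mem_items_insert c _ _ _).mp hpn with heq | ⟨hmem, _⟩
      · subst heq; dsimp only; omega
      · exact h3 _ hmem
    · intro q
      rw [PySem.Dict.contains_insert, PySem.Dict.contains_insert, h4]

lemma pvFold3 (t k : String) (vals : List (String × String))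
    (d : PySem.Dict (String × String) String)
    (c : PySem.Dict (String × String) Int)
    (r : PySem.Dict (String × String) String) (h : pvInv d c r) :
    pvInv (vals.foldl (fun m vp =>
            if (m.contains (k, vp.1)) = false then m.insert (k, vp.1) t
            else m.insert (k, vp.1) "both") d)
          (vals.foldl (fun cr vp =>
            (cr.1.insert (k, vp.1) (cr.1.getD (k, vp.1) 0 + 1),
             if (cr.2.contains (k, vp.1)) = false then cr.2.insert (k, vp.1) t
             else cr.2)) (c, r)).1
          (vals.foldl (fun cr vp =>
            (cr.1.insert (k, vp.1) (cr.1.getD (k, vp.1) 0 + 1),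
             if (cr.2.contains (k, vp.1)) = false then cr.2.insert (k, vp.1) t
             else cr.2)) (c, r)).2 := by
  induction vals generalizing d c r with
  | nil => exact h
  | cons v vs ih =>
    simp only [List.foldl_cons]
    exact ih _ _ _ (pvStep t (k, v.1) d c r h)

lemma pvFold2 (t : String) (ks : List (String × List (String × String)))
    (d : PySem.Dict (String × String) String)
    (c : PySem.Dict (String × String) Int)
    (r : PySem.Dict (String × String) String) (h : pvInv d c r) :
    pvInv (ks.foldl (fun m ks =>
            ks.2.foldl (fun m vp =>
              if (m.contains (ks.1, vp.1)) = false then m.insert (ks.1, vp.1) t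
              else m.insert (ks.1, vp.1) "both") m) d)
          (ks.foldl (fun cr ks =>
            ks.2.foldl (fun cr vp =>
              (cr.1.insert (ks.1, vp.1) (cr.1.getD (ks.1, vp.1) 0 + 1),
               if (cr.2.contains (ks.1, vp.1)) = false then cr.2.insert (ks.1, vp.1) t
               else cr.2)) cr) (c, r)).1
          (ks.foldl (fun cr ks =>
            ks.2.foldl (fun cr vp =>
              (cr.1.insert (ks.1, vp.1) (cr.1.getD (ks.1, vp.1) 0 + 1),
               if (cr.2.contains (ks.1, vp.1)) = false then cr.2.insert (ks.1, vp.1) t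
               else cr.2)) cr) (c, r)).2 := by
  induction ks generalizing d c r with
  | nil => exact h
  | cons kv rest ih =>
    simp only [List.foldl_cons]
    have h3 := pvFold3 t kv.1 kv.2 d c r h
    have : (kv.2.foldl (fun cr vp =>
        (cr.1.insert (kv.1, vp.1) (cr.1.getD (kv.1, vp.1) 0 + 1),
         if (cr.2.contains (kv.1, vp.1)) = false then cr.2.insert (kv.1, vp.1) t
         else cr.2)) (c, r)) =
        ((kv.2.foldl _ (c, r)).1, (kv.2.foldl _ (c, r)).2) := rfl
    exact this ▸ ih _ _ _ h3

lemma pvFold1 (tree : List (String × List (String × List (String × String))))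
    (d : PySem.Dict (String × String) String)
    (c : PySem.Dict (String × String) Int)
    (r : PySem.Dict (String × String) String) (h : pvInv d c r) :
    pvInv (tree.foldl (fun m ts =>
            ts.2.foldl (fun m ks =>
              ks.2.foldl (fun m vp =>
                if (m.contains (ks.1, vp.1)) = false then m.insert (ks.1, vp.1) ts.1
                else m.insert (ks.1, vp.1) "both") m) m) d)
          (tree.foldl (fun cr ts =>
            ts.2.foldl (fun cr ks =>
              ks.2.foldl (fun cr vp =>
                (cr.1.insert (ks.1, vp.1) (cr.1.getD (ks.1, vp.1) 0 + 1),
                 if (cr.2.contains (ks.1, vp.1)) = false then cr.2.insert (ks.1, vp.1) ts.1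
                 else cr.2)) cr) cr) (c, r)).1
          (tree.foldl (fun cr ts =>
            ts.2.foldl (fun cr ks =>
              ks.2.foldl (fun cr vp =>
                (cr.1.insert (ks.1, vp.1) (cr.1.getD (ks.1, vp.1) 0 + 1),
                 if (cr.2.contains (ks.1, vp.1)) = false then cr.2.insert (ks.1, vp.1) ts.1
                 else cr.2)) cr) cr) (c, r)).2 := by
  induction tree generalizing d c r with
  | nil => exact h
  | cons ts rest ih =>
    simp only [List.foldl_cons]
    have h2 := pvFold2 ts.1 ts.2 d c r h
    have : (ts.2.foldl (fun cr ks =>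
        ks.2.foldl (fun cr vp =>
          (cr.1.insert (ks.1, vp.1) (cr.1.getD (ks.1, vp.1) 0 + 1),
           if (cr.2.contains (ks.1, vp.1)) = false then cr.2.insert (ks.1, vp.1) ts.1
           else cr.2)) cr) (c, r)) =
        ((ts.2.foldl _ (c, r)).1, (ts.2.foldl _ (c, r)).2) := rfl
    exact this ▸ ih _ _ _ h2

-- ===== VERDICT (by name: the statement is the Claim_ definition above) =====
theorem generate_tag_type_map_spec : Claim_equal_generate_tag_type_map := by
  intro nsi_tree _
  unfold Spec_generate_tag_type_map generate_tag_type_map generate_tag_type_map_alt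
  have h := pvFold1 nsi_tree PySem.Dict.empty PySem.Dict.empty PySem.Dict.empty pvInv_empty
  obtain ⟨h1, _, _, _⟩ := h
  simp only [h1, List.map_map]
  rfl
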